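-- pv_equiv track=rewrite | github.com/henrique010/atividades | task-16-08-2019.py | tabuada
-- ===== SOURCE A (Python) =====
-- def tabuada(n):
--     v = []
--     i = 1
--     j = 0
--     while i <= n:
--         j = 1
--         while j <= n:
--             v.append(i * j)
--             j = j + 1
--
--         i = i + 1
--
--     return v
-- ===== SOURCE B (Python) =====
-- def tabuada(n):
--     base = list(range(1, n + 1)) if n > 0 else []
--     v = []
--     row = list(base)
--     for _ in range(n if n > 0 else 0):
--         v.extend(row)
--         row = [a + b for a, b in zip(row, base)]
--     return v
-- ===== Notes on version B (the rewrite author's own statement) =====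
-- stated objective: alternative
-- what changed: Replaces the nested multiplication loops by a single loop that maintains an accumulator row: row starts as [1..n] and the base vector is added elementwise after each append, so row at step i equals [i*1,...,i*n]; no inner multiplication loop remains.
import Mathlib
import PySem

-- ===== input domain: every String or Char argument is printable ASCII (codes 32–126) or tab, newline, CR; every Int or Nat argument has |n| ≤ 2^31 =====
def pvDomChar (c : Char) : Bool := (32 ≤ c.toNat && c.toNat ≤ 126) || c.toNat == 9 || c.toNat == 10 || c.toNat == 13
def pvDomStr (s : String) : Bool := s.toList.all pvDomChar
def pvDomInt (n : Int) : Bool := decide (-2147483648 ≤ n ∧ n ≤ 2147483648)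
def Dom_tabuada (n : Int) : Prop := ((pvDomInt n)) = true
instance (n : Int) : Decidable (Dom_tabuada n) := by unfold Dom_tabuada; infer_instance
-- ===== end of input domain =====

-- B replaces the nested multiplication loops by one loop maintaining an accumulator row
-- (row := row + base elementwise); same cost, different decomposition.

-- ===== PORT A =====
-- inner while loop: while j <= n: v.append(i*j); j += 1
def tabuadaInnerA (n i j : Int) (v : List Int) : List Int :=
  if j ≤ n then tabuadaInnerA n i (j + 1) (v ++ [i * j]) else v
termination_by (n + 1 - j).toNat
decreasing_by omega

-- outer while loop: while i <= n: <inner with j = 1>; i += 1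
def tabuadaOuterA (n i : Int) (v : List Int) : List Int :=
  if i ≤ n then tabuadaOuterA n (i + 1) (tabuadaInnerA n i 1 v) else v
termination_by (n + 1 - i).toNat
decreasing_by omega

def tabuada (n : Int) : List Int := tabuadaOuterA n 1 []

-- ===== PORT B =====
-- for _ in range(n): v.extend(row); row = [a+b for a,b in zip(row, base)]
def tabuadaLoopB (base : List Int) : Nat → List Int → List Int → List Int
  | 0, _, v => v
  | k + 1, row, v => tabuadaLoopB base k (List.zipWith (· + ·) row base) (v ++ row)

def tabuada_alt (n : Int) : List Int :=
  let base := if 0 < n then PySem.List.pyRange 1 (n + 1) 1 else []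
  tabuadaLoopB base (if 0 < n then n.toNat else 0) base []

-- ===== PRECONDITION & SPEC =====
def Spec_tabuada (n : Int) (out : List Int) : Prop := out = tabuada_alt n
instance (n : Int) (out : List Int) : Decidable (Spec_tabuada n out) := by unfold Spec_tabuada; infer_instance

-- ===== CLAIM (what is proved, stated in full; the proofs are below) =====
def Claim_equal_tabuada : Prop := ∀ (n : Int), Dom_tabuada n → Spec_tabuada n (tabuada n)

-- ===== LEMMAS AND PROOFS =====

theorem tabuadaInnerA_eq (n i : Int) : ∀ (k : Nat) (j : Int) (v : List Int),
    (n + 1 - j).toNat = k →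
    tabuadaInnerA n i j v = v ++ (PySem.List.pyRange j (n + 1) 1).map (i * ·) := by
  intro k
  induction k with
  | zero =>
    intro j v h
    rw [tabuadaInnerA]
    rw [if_neg (by omega), PySem.List.pyRange_one_eq_nil (by omega)]
    simp
  | succ k ih =>
    intro j v h
    rw [tabuadaInnerA]
    rw [if_pos (by omega), ih (j + 1) _ (by omega),
      PySem.List.pyRange_one_cons (by omega : j < n + 1)]
    simp

theorem zipWith_add_map (i : Int) : ∀ (l : List Int),
    List.zipWith (· + ·) (l.map (i * ·)) l = l.map ((i + 1) * ·) := by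
  intro l
  induction l with
  | nil => rfl
  | cons x xs ih => simp [ih]; ring

theorem tabuadaOuterA_eq (n : Int) : ∀ (k : Nat) (i : Int) (v : List Int),
    (n + 1 - i).toNat = k →
    tabuadaOuterA n i v =
      tabuadaLoopB (PySem.List.pyRange 1 (n + 1) 1) k
        ((PySem.List.pyRange 1 (n + 1) 1).map (i * ·)) v := by
  intro k
  induction k with
  | zero =>
    intro i v h
    rw [tabuadaOuterA, if_neg (by omega)]
    rfl
  | succ k ih =>
    intro i v h
    rw [tabuadaOuterA, if_pos (by omega),
      ih (i + 1) _ (by omega),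
      tabuadaInnerA_eq n i (n + 1 - 1).toNat 1 v (by omega)]
    simp only [tabuadaLoopB, zipWith_add_map]

theorem tabuada_eq_alt (n : Int) : tabuada n = tabuada_alt n := by
  unfold tabuada tabuada_alt
  by_cases h : 0 < n
  · rw [if_pos h, if_pos h,
      tabuadaOuterA_eq n n.toNat 1 [] (by omega)]
    congr 1
    simp
  · rw [if_neg h, if_neg h]
    rw [tabuadaOuterA_eq n 0 1 [] (by omega)]
    rfl

-- ===== VERDICT (by name: the statement is the Claim_ definition above) =====
theorem tabuada_spec : Claim_equal_tabuada := by
  intro n _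
  exact tabuada_eq_alt n
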